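-- pv_equiv track=rewrite | github.com/mcsnakey/advent-of-code-2023 | solutions/13/part2.py | _get_index_diff
-- ===== SOURCE A (Python) =====
-- def _get_index_diff(line_a, line_b):
--     if len(line_a) != len(line_b):
--         raise ValueError('lines must be same length')
--     idx = 0
--     while idx < len(line_a):
--         if all((
--             line_a[idx] != line_b[idx],
--             line_a[:idx] == line_b[:idx],
--             line_a[idx + 1:] == line_b[idx + 1:]
--         )):
--             return idx
--         idx += 1
--     return -1
-- ===== SOURCE B (Python) =====
-- def _get_index_diff(line_a, line_b):
--     if len(line_a) != len(line_b):
--         raise ValueError('lines must be same length')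
--     first = -1
--     count = 0
--     for i, (x, y) in enumerate(zip(line_a, line_b)):
--         if x != y:
--             if count == 0:
--                 first = i
--             count += 1
--     return first if count == 1 else -1
-- ===== Notes on version B (the rewrite author's own statement) =====
-- stated objective: faster
-- what changed: Replaces the quadratic loop that compares the full prefix and suffix slices at every index with a single pass over the zipped characters that counts mismatches and remembers the first mismatch index, returning it only when the count is exactly one.
import Mathlib
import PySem

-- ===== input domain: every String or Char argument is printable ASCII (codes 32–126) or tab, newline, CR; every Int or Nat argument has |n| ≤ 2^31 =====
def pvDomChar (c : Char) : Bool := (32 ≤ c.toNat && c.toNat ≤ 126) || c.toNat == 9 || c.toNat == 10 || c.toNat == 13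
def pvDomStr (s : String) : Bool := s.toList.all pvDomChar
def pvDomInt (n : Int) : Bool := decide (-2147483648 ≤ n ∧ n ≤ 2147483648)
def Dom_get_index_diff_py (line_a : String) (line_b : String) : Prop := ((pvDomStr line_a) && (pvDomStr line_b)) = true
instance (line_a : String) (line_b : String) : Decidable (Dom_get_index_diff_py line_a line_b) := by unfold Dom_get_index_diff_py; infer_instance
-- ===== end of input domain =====

-- B replaces A's quadratic slice-comparing loop by one linear counting pass (faster, asymptotic).
-- Both Pythons raise ValueError on unequal lengths; those inputs are excluded by Pre_.

-- ===== PORT A =====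
-- the while loop: at each idx compare the characters and both surrounding slices
def pvLoopA (la lb : List Char) (idx : Nat) : Int :=
  if idx < la.length then
    if PySem.List.pyGet? la (idx : Int) ≠ PySem.List.pyGet? lb (idx : Int)
        ∧ PySem.List.slice la none (some (idx : Int)) = PySem.List.slice lb none (some (idx : Int))
        ∧ PySem.List.slice la (some ((idx : Int) + 1)) none = PySem.List.slice lb (some ((idx : Int) + 1)) none
    then (idx : Int)
    else pvLoopA la lb (idx + 1)
  else -1
termination_by la.length - idx

def get_index_diff_py (line_a : String) (line_b : String) : Int :=
  -- Python raises ValueError on unequal lengths (outside Pre_); the port returns -1 there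
  if line_a.toList.length ≠ line_b.toList.length then -1
  else pvLoopA line_a.toList line_b.toList 0

-- ===== PORT B =====
-- one pass over the zipped characters: count mismatches, remember the first mismatch index
def pvLoopB (ps : List (Char × Char)) (i : Nat) (first : Int) (count : Nat) : Int :=
  match ps with
  | [] => if count = 1 then first else -1
  | (x, y) :: rest =>
      if x ≠ y then pvLoopB rest (i + 1) (if count = 0 then (i : Int) else first) (count + 1)
      else pvLoopB rest (i + 1) first count

def get_index_diff_py_alt (line_a : String) (line_b : String) : Int :=
  -- Python raises ValueError on unequal lengths (outside Pre_); the port returns -1 there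
  if line_a.toList.length ≠ line_b.toList.length then -1
  else pvLoopB (line_a.toList.zip line_b.toList) 0 (-1) 0

-- ===== PRECONDITION & SPEC =====
-- Pre_ excludes exactly the inputs of unequal length, on which Python A raises ValueError
def Pre_get_index_diff_py (line_a : String) (line_b : String) : Prop :=
  line_a.toList.length = line_b.toList.length
instance (line_a : String) (line_b : String) : Decidable (Pre_get_index_diff_py line_a line_b) := by
  unfold Pre_get_index_diff_py; infer_instance

def pvWitness_get_index_diff_py : String × String := ("ab", "ac")

def Spec_get_index_diff_py (line_a : String) (line_b : String) (out : Int) : Prop := out = get_index_diff_py_alt line_a line_b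
instance (line_a : String) (line_b : String) (out : Int) : Decidable (Spec_get_index_diff_py line_a line_b out) := by unfold Spec_get_index_diff_py; infer_instance

-- ===== CLAIM (what is proved, stated in full; the proofs are below) =====
def Claim_equal_get_index_diff_py : Prop := ∀ (line_a : String) (line_b : String), Dom_get_index_diff_py line_a line_b → Pre_get_index_diff_py line_a line_b → Spec_get_index_diff_py line_a line_b (get_index_diff_py line_a line_b)

-- ===== LEMMAS AND PROOFS =====

-- result shifted by one position (−1 stays −1)
def pvShift (r : Int) : Int := if r = -1 then -1 else r + 1

-- once two mismatches have been counted, B's loop returns -1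
theorem pvLoopB_ge_two (ps : List (Char × Char)) : ∀ (i : Nat) (f : Int) (c : Nat), 2 ≤ c →
    pvLoopB ps i f c = -1 := by
  induction ps with
  | nil =>
      intro i f c hc
      rw [pvLoopB, if_neg (by omega)]
  | cons p rest ih =>
      intro i f c hc
      obtain ⟨x, y⟩ := p
      rw [pvLoopB]
      by_cases hxy : x ≠ y
      · rw [if_pos hxy]; exact ih _ _ _ (by omega)
      · rw [if_neg hxy]; exact ih _ _ _ hc

-- with exactly one mismatch counted, B returns `f` iff no further mismatch occurs
theorem pvLoopB_one (ps : List (Char × Char)) : ∀ (i : Nat) (f : Int),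
    pvLoopB ps i f 1 = if ps.all (fun p => p.1 == p.2) then f else -1 := by
  induction ps with
  | nil => intro i f; rw [pvLoopB]; simp
  | cons p rest ih =>
      intro i f
      obtain ⟨x, y⟩ := p
      rw [pvLoopB]
      by_cases hxy : x ≠ y
      · rw [if_pos hxy]
        have hfalse : (((x, y) :: rest).all fun p => p.1 == p.2) = false := by
          simp [hxy]
        rw [hfalse]
        simp only [Bool.false_eq_true, if_false]
        exact pvLoopB_ge_two rest _ _ _ (by omega)
      · rw [if_neg hxy, ih]
        have hx : (x == y) = true := by simpa using not_not.mp hxy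
        simp [hx]

-- starting B's scan one position later shifts its result
theorem pvLoopB_shift (ps : List (Char × Char)) : ∀ (i : Nat),
    pvLoopB ps (i + 1) (-1) 0 = pvShift (pvLoopB ps i (-1) 0) := by
  induction ps with
  | nil => intro i; rw [pvLoopB, pvLoopB]; simp [pvShift]
  | cons p rest ih =>
      intro i
      obtain ⟨x, y⟩ := p
      rw [pvLoopB, pvLoopB]
      by_cases hxy : x ≠ y
      · rw [if_pos hxy, if_pos hxy]
        rw [pvLoopB_one, pvLoopB_one]
        by_cases hall : rest.all (fun p => p.1 == p.2)
        · rw [if_pos hall, if_pos hall]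
          simp only [pvShift, if_true]
          rw [if_neg (by omega : ¬ ((i : Int)) = -1)]
          push_cast; ring
        · rw [if_neg hall, if_neg hall]; simp [pvShift]
      · rw [if_neg hxy, if_neg hxy]
        exact ih (i + 1)

-- zipped pairwise equality of equal-length lists is list equality
theorem pvZipAllEq (la : List Char) : ∀ (lb : List Char), la.length = lb.length →
    (((la.zip lb).all (fun p => p.1 == p.2)) = true ↔ la = lb) := by
  induction la with
  | nil => intro lb h; cases lb <;> simp_all
  | cons c ta ih =>
      intro lb h
      cases lb with
      | nil => simp at h
      | cons d tb =>
          simp only [List.zip_cons_cons, List.all_cons]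
          simp only [List.length_cons, Nat.add_right_cancel_iff] at h
          constructor
          · intro hb
            simp only [Bool.and_eq_true, beq_iff_eq] at hb
            obtain ⟨rfl, h2⟩ := hb
            rw [(ih tb h).mp h2]
          · intro hb
            injection hb with h1 h2
            subst h1
            simp [(ih tb h).mpr h2]

-- A's loop condition at idx k+1 on cons lists equals the condition at idx k on the tails
theorem pvCondA_cons (c d : Char) (ta tb : List Char) (k : Nat) :
    (PySem.List.pyGet? (c :: ta) (((k+1 : Nat)) : Int) ≠ PySem.List.pyGet? (d :: tb) (((k+1 : Nat)) : Int)
      ∧ PySem.List.slice (c :: ta) none (some (((k+1 : Nat)) : Int)) = PySem.List.slice (d :: tb) none (some (((k+1 : Nat)) : Int))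
      ∧ PySem.List.slice (c :: ta) (some ((((k+1 : Nat)) : Int) + 1)) none = PySem.List.slice (d :: tb) (some ((((k+1 : Nat)) : Int) + 1)) none)
    ↔ (c = d ∧ (PySem.List.pyGet? ta ((k : Nat) : Int) ≠ PySem.List.pyGet? tb ((k : Nat) : Int)
      ∧ PySem.List.slice ta none (some ((k : Nat) : Int)) = PySem.List.slice tb none (some ((k : Nat) : Int))
      ∧ PySem.List.slice ta (some (((k : Nat) : Int) + 1)) none = PySem.List.slice tb (some (((k : Nat) : Int) + 1)) none)) := by
  rw [show (((k+1 : Nat) : Int) + 1) = ((k+2 : Nat) : Int) by push_cast; ring,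
      show (((k : Nat) : Int) + 1) = ((k+1 : Nat) : Int) by push_cast; ring,
      PySem.List.slice_to_natCast, PySem.List.slice_to_natCast,
      PySem.List.slice_to_natCast, PySem.List.slice_to_natCast,
      PySem.List.slice_from_natCast, PySem.List.slice_from_natCast,
      PySem.List.slice_from_natCast, PySem.List.slice_from_natCast]
  simp only [PySem.List.pyGet?_natCast, List.getElem?_cons_succ, List.take_succ_cons,
    List.drop_succ_cons, List.cons.injEq]
  constructor
  · rintro ⟨h1, ⟨hcd, h2⟩, h3⟩; exact ⟨hcd, h1, h2, h3⟩
  · rintro ⟨hcd, h1, h2, h3⟩; exact ⟨h1, ⟨hcd, h2⟩, h3⟩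

theorem pvLoopA_shift (c : Char) (ta tb : List Char) : ∀ (k : Nat),
    pvLoopA (c :: ta) (c :: tb) (k + 1) = pvShift (pvLoopA ta tb k) := by
  intro k
  induction hn : ta.length - k using Nat.strong_induction_on generalizing k with
  | _ n ih =>
    by_cases hk : k < ta.length
    · conv_lhs => rw [pvLoopA]
      conv_rhs => rw [pvLoopA]
      rw [if_pos (by simp; omega : k + 1 < (c :: ta).length), if_pos hk]
      by_cases hc : (PySem.List.pyGet? ta ((k : Nat) : Int) ≠ PySem.List.pyGet? tb ((k : Nat) : Int)
          ∧ PySem.List.slice ta none (some ((k : Nat) : Int)) = PySem.List.slice tb none (some ((k : Nat) : Int))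
          ∧ PySem.List.slice ta (some (((k : Nat) : Int) + 1)) none = PySem.List.slice tb (some (((k : Nat) : Int) + 1)) none)
      · rw [if_pos ((pvCondA_cons c c ta tb k).mpr ⟨rfl, hc⟩), if_pos hc]
        simp only [pvShift]
        rw [if_neg (by omega : ¬ ((k : Int)) = -1)]
        push_cast; ring
      · rw [if_neg (fun h => hc ((pvCondA_cons c c ta tb k).mp h).2), if_neg hc]
        exact ih (ta.length - (k + 1)) (by omega) (k + 1) rfl
    · conv_lhs => rw [pvLoopA]
      conv_rhs => rw [pvLoopA]
      rw [if_neg (by simp; omega : ¬ (k + 1 < (c :: ta).length)), if_neg hk]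
      simp [pvShift]

-- with differing heads, A's loop past position 0 never fires: the prefix slices differ
theorem pvLoopA_dead (c d : Char) (ta tb : List Char) (hcd : c ≠ d) : ∀ (j : Nat),
    pvLoopA (c :: ta) (d :: tb) (j + 1) = -1 := by
  intro j
  induction hn : ta.length - j using Nat.strong_induction_on generalizing j with
  | _ n ih =>
    rw [pvLoopA]
    by_cases hj : j + 1 < (c :: ta).length
    · rw [if_pos hj]
      have hpre : PySem.List.slice (c :: ta) none (some ((j + 1 : Nat) : Int))
          ≠ PySem.List.slice (d :: tb) none (some ((j + 1 : Nat) : Int)) := by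
        rw [PySem.List.slice_to_natCast, PySem.List.slice_to_natCast]
        simp [List.take_succ_cons, hcd]
      rw [if_neg (fun h => hpre h.2.1)]
      exact ih (ta.length - (j + 1)) (by simp at hj; omega) (j + 1) rfl
    · rw [if_neg hj]

theorem pvMain (la : List Char) : ∀ (lb : List Char), la.length = lb.length →
    pvLoopA la lb 0 = pvLoopB (la.zip lb) 0 (-1) 0 := by
  induction la with
  | nil =>
    intro lb h
    have : lb = [] := List.length_eq_zero_iff.mp h.symm
    subst this
    rw [pvLoopA, show ([] : List Char).zip [] = [] from rfl, pvLoopB]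
    simp
  | cons c ta ih =>
    intro lb h
    cases lb with
    | nil => simp at h
    | cons d tb =>
      simp only [List.length_cons, Nat.add_right_cancel_iff] at h
      conv_lhs => rw [pvLoopA]
      rw [if_pos (by simp : (0 : Nat) < (c :: ta).length)]
      by_cases hcd : c = d
      · subst hcd
        rw [if_neg (by simp [PySem.List.pyGet?, PySem.List.pyIdx?])]
        have hA : pvLoopA (c :: ta) (c :: tb) (0 + 1) = pvShift (pvLoopA ta tb 0) :=
          pvLoopA_shift c ta tb 0
        simp only [Nat.zero_add] at hA
        rw [hA, ih tb h]
        rw [List.zip_cons_cons, pvLoopB, if_neg (by simp : ¬ c ≠ c)]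
        exact (pvLoopB_shift (ta.zip tb) 0).symm
      · rw [List.zip_cons_cons, pvLoopB, if_pos hcd, if_pos rfl, pvLoopB_one]
        by_cases hsuf : PySem.List.slice (c :: ta) (some ((0 : Int) + 1)) none
            = PySem.List.slice (d :: tb) (some ((0 : Int) + 1)) none
        · have hta : ta = tb := by
            rw [show ((0 : Int) + 1) = ((1 : Nat) : Int) by norm_num,
              PySem.List.slice_from_natCast, PySem.List.slice_from_natCast] at hsuf
            simpa using hsuf
          rw [if_pos ⟨by simp [PySem.List.pyGet?, PySem.List.pyIdx?, hcd],
              by simp [PySem.List.slice], hsuf⟩]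
          rw [if_pos (by simp [(pvZipAllEq ta tb h).mpr hta])]
        · rw [if_neg (fun hco => hsuf hco.2.2)]
          have hA : pvLoopA (c :: ta) (d :: tb) (0 + 1) = -1 := pvLoopA_dead c d ta tb hcd 0
          simp only [Nat.zero_add] at hA
          rw [hA]
          have hne : ta ≠ tb := by
            intro hEq; subst hEq; exact hsuf rfl
          rw [if_neg (by simpa [pvZipAllEq ta tb h])]

-- ===== VERDICT (by name: the statement is the Claim_ definition above) =====
theorem get_index_diff_py_spec : Claim_equal_get_index_diff_py := by
  intro la lb _ hpre
  unfold Spec_get_index_diff_py get_index_diff_py get_index_diff_py_alt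
  unfold Pre_get_index_diff_py at hpre
  rw [if_neg (by omega), if_neg (by omega)]
  exact pvMain la.toList lb.toList hpre
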